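-- pv_equiv track=rewrite | github.com/AdvancedPhotonSource/GSAS-II | GSASIImapvars.py | GroupConstraints
-- ===== SOURCE A (Python) =====
-- def VarKeys(constr):
--     """Finds the keys in a constraint that represent parameters
--     e.g. eliminates any that start with '_'
--
--     :param dict constr: a single constraint entry of form::
--
--         {'var1': mult1, 'var2': mult2,... '_notVar': val,...}
--
--         (see :func:`GroupConstraints`)
--     :returns: a list of keys where any keys beginning with '_' are
--       removed.
--     """
--     return [i for i in constr.keys() if not i.startswith('_')]
--
-- def GroupConstraints(constrDict):
--     """Divide the constraints into groups that share no parameters.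
--
--     :param dict constrDict: a list of dicts defining relationships/constraints
--
--     ::
--
--        constrDict = [{<constr1>}, {<constr2>}, ...]
--
--     where {<constr1>} is {'var1': mult1, 'var2': mult2,... }
--
--     :returns: two lists of lists:
--
--       * a list of grouped contraints where each constraint grouped containts a list
--         of indices for constraint constrDict entries
--       * a list containing lists of parameter names contained in each group
--
--     """
--     assignedlist = [] # relationships that have been used
--     groups = [] # contains a list of grouplists
--     ParmList = []
--     for i,constrI in enumerate(constrDict):
--         if i in assignedlist: continue # already in a group, skip
--         # starting a new group
--         grouplist = [i,]
--         assignedlist.append(i)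
--         groupset = set(VarKeys(constrI))
--         changes = True # always loop at least once
--         while(changes): # loop until we can't find anything to add to the current group
--             changes = False # but don't loop again unless we find something
--             for j,constrJ in enumerate(constrDict):
--                 if j in assignedlist: continue # already in a group, skip
--                 if len(set(VarKeys(constrJ)) & groupset) > 0: # true if this needs to be added
--                     changes = True
--                     grouplist.append(j)
--                     assignedlist.append(j)
--                     groupset = groupset | set(VarKeys(constrJ))
--         group = sorted(grouplist)
--         varlist = sorted(list(groupset))
--         groups.append(group)
--         ParmList.append(varlist)
--     return groups,ParmList
-- ===== SOURCE B (Python) =====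
-- def VarKeys(constr):
--     return [i for i in constr.keys() if not i.startswith('_')]
--
-- def GroupConstraints(constrDict):
--     """Divide the constraints into groups that share no parameters.
--
--     Builds a parameter->constraint-indices index in one pass, then finds each
--     group as a connected component by a depth-first search with an explicit
--     stack over that index, instead of repeatedly rescanning the whole
--     constraint list until nothing changes.
--     """
--     keylists = [VarKeys(c) for c in constrDict]
--     index = {}
--     for i, keys in enumerate(keylists):
--         for p in keys:
--             index.setdefault(p, []).append(i)
--     visited = set()
--     groups = []
--     ParmList = []
--     for i in range(len(constrDict)):
--         if i in visited:
--             continue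
--         visited.add(i)
--         comp = []
--         stack = [i]
--         params = set()
--         while stack:
--             j = stack.pop()
--             comp.append(j)
--             for p in keylists[j]:
--                 params.add(p)
--                 for k in index[p]:
--                     if k not in visited:
--                         visited.add(k)
--                         stack.append(k)
--         groups.append(sorted(comp))
--         ParmList.append(sorted(params))
--     return groups, ParmList
-- ===== Notes on version B (the rewrite author's own statement) =====
-- stated objective: faster
-- what changed: Replaced A's fixpoint while-loop that repeatedly rescans the whole constraint list per group by a one-pass parameter-to-constraint-indices index followed by an explicit-stack depth-first search over that index for each connected component.
import Mathlib
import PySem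

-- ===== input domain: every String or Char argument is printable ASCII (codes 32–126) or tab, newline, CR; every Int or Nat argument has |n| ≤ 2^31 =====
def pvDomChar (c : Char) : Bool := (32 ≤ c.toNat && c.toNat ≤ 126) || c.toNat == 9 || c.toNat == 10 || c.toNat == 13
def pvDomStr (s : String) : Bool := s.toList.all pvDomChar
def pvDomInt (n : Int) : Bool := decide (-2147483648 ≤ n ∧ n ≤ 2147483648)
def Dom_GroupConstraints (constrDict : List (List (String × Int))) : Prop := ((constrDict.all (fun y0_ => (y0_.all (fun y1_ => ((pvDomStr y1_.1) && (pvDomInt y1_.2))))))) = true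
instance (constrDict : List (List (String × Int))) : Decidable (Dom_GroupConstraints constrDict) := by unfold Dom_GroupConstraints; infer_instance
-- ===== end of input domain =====

-- B replaces A's repeated full rescans (fixpoint 'while changes' loop) by a one-pass
-- param->constraint-indices index plus an explicit-stack depth-first search per
-- connected component; same return value.

-- ===== PORT A =====
def pvVarKeys (c : List (String × Int)) : List String :=
  (PySem.List.dedup (c.map Prod.fst)).filter (fun s => !(PySem.Str.startswith s "_"))

def pvAstep (st : List Int × List Int × PySem.Set String × Bool)
    (jc : Int × List (String × Int)) : List Int × List Int × PySem.Set String × Bool :=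
  if jc.1 ∈ st.2.1 then st
  else if 0 < PySem.Set.len (PySem.Set.inter (PySem.Set.ofList (pvVarKeys jc.2)) st.2.2.1) then
    (st.1 ++ [jc.1], st.2.1 ++ [jc.1],
     PySem.Set.union st.2.2.1 (PySem.Set.ofList (pvVarKeys jc.2)), true)
  else st

def pvApass (constrDict : List (List (String × Int)))
    (st : List Int × List Int × PySem.Set String × Bool) :
    List Int × List Int × PySem.Set String × Bool :=
  (PySem.List.enumerate constrDict).foldl pvAstep st

def pvAwhile (constrDict : List (List (String × Int))) :
    Nat → List Int × List Int × PySem.Set String → List Int × List Int × PySem.Set String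
  | 0, st => st
  | fuel + 1, st =>
    let r := pvApass constrDict (st.1, st.2.1, st.2.2, false)
    if r.2.2.2 then pvAwhile constrDict fuel (r.1, r.2.1, r.2.2.1) else (r.1, r.2.1, r.2.2.1)

def pvAouter (constrDict : List (List (String × Int)))
    (st : List Int × List (List Int) × List (List String))
    (ic : Int × List (String × Int)) : List Int × List (List Int) × List (List String) :=
  if ic.1 ∈ st.1 then st
  else
    let r := pvAwhile constrDict (constrDict.length + 1)
      ([ic.1], st.1 ++ [ic.1], PySem.Set.ofList (pvVarKeys ic.2))
    (r.2.1, st.2.1 ++ [PySem.List.sorted r.1 (fun x => x) false],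
            st.2.2 ++ [PySem.List.sorted r.2.2 (fun x => x) false])

def GroupConstraints (constrDict : List (List (String × Int))) :
    List (List Int) × List (List String) :=
  let fin := (PySem.List.enumerate constrDict).foldl (pvAouter constrDict) ([], [], [])
  (fin.2.1, fin.2.2)

-- ===== PORT B =====
def pvBindex (keylists : List (List String)) : PySem.Dict String (List Int) :=
  (PySem.List.enumerate keylists).foldl
    (fun d ik => ik.2.foldl (fun d p => d.insert p (d.getD p [] ++ [ik.1])) d)
    PySem.Dict.empty

def pvBpush (sv : List Int × PySem.Set Int) (k : Int) : List Int × PySem.Set Int :=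
  if PySem.Set.contains sv.2 k then sv else (sv.1 ++ [k], PySem.Set.add sv.2 k)

def pvBkey (index : PySem.Dict String (List Int))
    (svp : List Int × PySem.Set Int × PySem.Set String) (p : String) :
    List Int × PySem.Set Int × PySem.Set String :=
  let par := PySem.Set.add svp.2.2 p
  let sv := (index.getD p []).foldl pvBpush (svp.1, svp.2.1)
  (sv.1, sv.2, par)

def pvBdfs (keylists : List (List String)) (index : PySem.Dict String (List Int)) :
    Nat → List Int × List Int × PySem.Set Int × PySem.Set String →
    List Int × PySem.Set Int × PySem.Set String
  | 0, st => (st.1, st.2.2.1, st.2.2.2)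
  | fuel + 1, st =>
    match PySem.List.pop? st.2.1 (-1) with
    | none => (st.1, st.2.2.1, st.2.2.2)
    | some (j, rest) =>
      let ks := PySem.List.pyGetD keylists j []
      let r := ks.foldl (pvBkey index) (rest, st.2.2.1, st.2.2.2)
      pvBdfs keylists index fuel (st.1 ++ [j], r.1, r.2.1, r.2.2)

def pvBouter (keylists : List (List String)) (index : PySem.Dict String (List Int)) (n : Nat)
    (st : PySem.Set Int × List (List Int) × List (List String)) (i : Int) :
    PySem.Set Int × List (List Int) × List (List String) :=
  if PySem.Set.contains st.1 i then st
  else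
    let r := pvBdfs keylists index (n + 1) ([], [i], PySem.Set.add st.1 i, PySem.Set.empty)
    (r.2.1, st.2.1 ++ [PySem.List.sorted r.1 (fun x => x) false],
            st.2.2 ++ [PySem.List.sorted r.2.2 (fun x => x) false])

def GroupConstraints_alt (constrDict : List (List (String × Int))) :
    List (List Int) × List (List String) :=
  let keylists := constrDict.map pvVarKeys
  let index := pvBindex keylists
  let fin := (PySem.List.pyRange 0 (constrDict.length : Int) 1).foldl
    (pvBouter keylists index constrDict.length) (PySem.Set.empty, [], [])
  (fin.2.1, fin.2.2)

-- ===== PRECONDITION & SPEC =====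
def Spec_GroupConstraints (constrDict : List (List (String × Int))) (out : List (List Int) × List (List String)) : Prop := out = GroupConstraints_alt constrDict
instance (constrDict : List (List (String × Int))) (out : List (List Int) × List (List String)) : Decidable (Spec_GroupConstraints constrDict out) := by unfold Spec_GroupConstraints; infer_instance

-- ===== CLAIM =====
def Claim_equal_GroupConstraints : Prop := ∀ (constrDict : List (List (String × Int))), Dom_GroupConstraints constrDict → Spec_GroupConstraints constrDict (GroupConstraints constrDict)

-- ===== LEMMAS AND PROOFS =====
def pvKeysAt (kl : List (List String)) (a : Int) : List String :=
  if 0 ≤ a then kl.getD a.toNat [] else []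

def pvAdjI (kl : List (List String)) (a b : Int) : Prop :=
  ∃ p, p ∈ pvKeysAt kl a ∧ p ∈ pvKeysAt kl b

def pvReach (kl : List (List String)) (a b : Int) : Prop :=
  Relation.ReflTransGen (pvAdjI kl) a b

theorem pvMem_keysAt_bounds {kl : List (List String)} {a : Int} {p : String}
    (h : p ∈ pvKeysAt kl a) : 0 ≤ a ∧ a.toNat < kl.length := by
  unfold pvKeysAt at h
  split at h
  · refine ⟨by assumption, ?_⟩
    by_contra hlt
    rw [List.getD_eq_getElem?_getD, List.getElem?_eq_none (by omega)] at h
    simp at h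
  · simp at h

theorem pvAdjI_symm {kl : List (List String)} {a b : Int}
    (h : pvAdjI kl a b) : pvAdjI kl b a := by
  obtain ⟨p, h1, h2⟩ := h; exact ⟨p, h2, h1⟩

theorem pvKeysAt_map (cd : List (List (String × Int))) (f : List (String × Int) → List String)
    (k : Nat) (hk : k < cd.length) :
    pvKeysAt (cd.map f) (k : Int) = f (PySem.List.pyGetD cd (k : Int) []) := by
  unfold pvKeysAt
  rw [if_pos (by positivity), PySem.List.pyGetD_natCast]
  simp only [Int.toNat_natCast]
  rw [List.getD_eq_getElem?_getD, List.getD_eq_getElem?_getD,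
    List.getElem?_eq_getElem (by simpa using hk), List.getElem?_eq_getElem hk]
  simp

theorem pvReach_mem_closed {kl : List (List String)} {V0 : Int → Prop} {S : List Int} {i : Int}
    (hV0closed : ∀ a b, V0 a → pvAdjI kl a b → V0 b)
    (hSfresh : ∀ x ∈ S, ¬ V0 x)
    (hiS : i ∈ S)
    (hSclosed : ∀ x ∈ S, ∀ b, pvAdjI kl x b → V0 b ∨ b ∈ S) :
    ∀ x, pvReach kl i x → x ∈ S := by
  intro x hx
  induction hx with
  | refl => exact hiS
  | tail hab hadj ih =>
    rename_i a b
    rcases hSclosed a ih b hadj with hV | hS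
    · exact absurd (hV0closed b a hV (pvAdjI_symm hadj)) (hSfresh a ih)
    · exact hS

theorem pvInter_pos (s t : PySem.Set String) :
    (0 < PySem.Set.len (PySem.Set.inter s t)) ↔ ∃ p, p ∈ s ∧ p ∈ t := by
  rw [PySem.Set.len_eq]
  constructor
  · intro h
    have : PySem.Set.inter s t ≠ [] := by
      intro he; rw [he] at h; simp at h
    obtain ⟨p, hp⟩ := List.exists_mem_of_ne_nil _ this
    exact ⟨p, (PySem.Set.mem_inter s t p).1 hp⟩
  · rintro ⟨p, h1, h2⟩
    have : p ∈ PySem.Set.inter s t := (PySem.Set.mem_inter s t p).2 ⟨h1, h2⟩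
    have := List.length_pos_of_mem this
    omega

-- invariant of A's saturation state (grouplist, assignedlist, groupset, changes)

def pvAInv (kl : List (List String)) (i : Int) (asg0 : List Int)
    (st : List Int × List Int × PySem.Set String × Bool) : Prop :=
  st.2.1 = asg0 ++ st.1 ∧ st.1.Nodup ∧
  (∀ x ∈ st.1, pvReach kl i x) ∧ (∀ x ∈ st.1, x ∉ asg0) ∧
  (∀ x ∈ st.1, 0 ≤ x ∧ x < (kl.length : Int)) ∧
  (∀ p, p ∈ st.2.2.1 ↔ ∃ x ∈ st.1, p ∈ pvKeysAt kl x) ∧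
  st.2.2.1.Nodup

theorem pvAstep_inv {kl : List (List String)} {i : Int} {asg0 : List Int}
    {st : List Int × List Int × PySem.Set String × Bool}
    {jc : Int × List (String × Int)} (hjc : pvVarKeys jc.2 = pvKeysAt kl jc.1)
    (h : pvAInv kl i asg0 st) :
    pvAInv kl i asg0 (pvAstep st jc) ∧ st.1.length ≤ (pvAstep st jc).1.length ∧
      ((pvAstep st jc).2.2.2 = true → st.2.2.2 = true ∨ st.1.length < (pvAstep st jc).1.length) := by
  obtain ⟨h1, h2, h3, h4, h5, h6, h7⟩ := h
  unfold pvAstep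
  by_cases hmem : jc.1 ∈ st.2.1
  · simp only [if_pos hmem]
    exact ⟨⟨h1, h2, h3, h4, h5, h6, h7⟩, le_refl _, fun h => Or.inl h⟩
  · rw [if_neg hmem]
    by_cases hcond : 0 < PySem.Set.len (PySem.Set.inter (PySem.Set.ofList (pvVarKeys jc.2)) st.2.2.1)
    · rw [if_pos hcond]
      obtain ⟨p, hp1, hp2⟩ := (pvInter_pos _ _).1 hcond
      rw [PySem.Set.mem_ofList, hjc] at hp1
      obtain ⟨x, hx, hpx⟩ := (h6 p).1 hp2
      have hreachj : pvReach kl i jc.1 :=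
        Relation.ReflTransGen.tail (h3 x hx) ⟨p, hpx, hp1⟩
      have hboundj := pvMem_keysAt_bounds hp1
      have hnotgl : jc.1 ∉ st.1 := fun hg => hmem (by rw [h1]; exact List.mem_append_right _ hg)
      have hnot0 : jc.1 ∉ asg0 := fun hg => hmem (by rw [h1]; exact List.mem_append_left _ hg)
      refine ⟨⟨by rw [h1, List.append_assoc], ?_, ?_, ?_, ?_, ?_, ?_⟩, by simp, fun _ => Or.inr (by simp)⟩
      · exact h2.append (List.nodup_singleton _) (fun a ha hb => hnotgl ((List.mem_singleton.1 hb) ▸ ha))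
      · intro x hx'
        rcases List.mem_append.1 hx' with hx' | hx'
        · exact h3 x hx'
        · rw [List.mem_singleton.1 hx']; exact hreachj
      · intro x hx'
        rcases List.mem_append.1 hx' with hx' | hx'
        · exact h4 x hx'
        · rw [List.mem_singleton.1 hx']; exact hnot0
      · intro x hx'
        rcases List.mem_append.1 hx' with hx' | hx'
        · exact h5 x hx'
        · rw [List.mem_singleton.1 hx']; exact ⟨hboundj.1, by omega⟩
      · intro q
        rw [PySem.Set.mem_union, PySem.Set.mem_ofList, hjc, h6]
        constructor
        · rintro (⟨x, hx', hq⟩ | hq)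
          · exact ⟨x, List.mem_append_left _ hx', hq⟩
          · exact ⟨jc.1, List.mem_append_right _ (List.mem_singleton_self _), hq⟩
        · rintro ⟨x, hx', hq⟩
          rcases List.mem_append.1 hx' with hx' | hx'
          · exact Or.inl ⟨x, hx', hq⟩
          · exact Or.inr (by rw [← List.mem_singleton.1 hx']; exact hq)
      · exact PySem.Set.nodup_union _ _ h7
    · rw [if_neg hcond]
      exact ⟨⟨h1, h2, h3, h4, h5, h6, h7⟩, le_refl _, fun h => Or.inl h⟩

theorem pvApass_fold {kl : List (List String)} {i : Int} {asg0 : List Int}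
    (l : List (Int × List (String × Int)))
    (hl : ∀ jc ∈ l, pvVarKeys jc.2 = pvKeysAt kl jc.1) :
    ∀ st, pvAInv kl i asg0 st →
    pvAInv kl i asg0 (l.foldl pvAstep st) ∧ st.1.length ≤ (l.foldl pvAstep st).1.length ∧
      ((l.foldl pvAstep st).2.2.2 = true → st.2.2.2 = true ∨ st.1.length < (l.foldl pvAstep st).1.length) := by
  induction l with
  | nil => exact fun st h => ⟨h, le_refl _, fun h => Or.inl h⟩
  | cons jc l ih =>
    intro st h
    have hstep := pvAstep_inv (hl jc (List.mem_cons_self)) h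
    have hrest := ih (fun x hx => hl x (List.mem_cons_of_mem _ hx)) _ hstep.1
    rw [List.foldl_cons]
    refine ⟨hrest.1, le_trans hstep.2.1 hrest.2.1, ?_⟩
    intro hch
    rcases hrest.2.2 hch with hch' | hlt
    · rcases hstep.2.2 hch' with h | h
      · exact Or.inl h
      · exact Or.inr (lt_of_lt_of_le h hrest.2.1)
    · exact Or.inr (lt_of_le_of_lt hstep.2.1 hlt)

theorem pvApass_true (l : List (Int × List (String × Int)))
    (st : List Int × List Int × PySem.Set String × Bool) (h : st.2.2.2 = true) :
    (l.foldl pvAstep st).2.2.2 = true := by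
  induction l generalizing st with
  | nil => exact h
  | cons jc l ih =>
    rw [List.foldl_cons]
    refine ih _ ?_
    unfold pvAstep
    split
    · exact h
    · split
      · rfl
      · exact h

theorem pvApass_nochange (l : List (Int × List (String × Int))) :
    ∀ (gl asg : List Int) (gs : PySem.Set String),
    (l.foldl pvAstep (gl, asg, gs, false)).2.2.2 = false →
    l.foldl pvAstep (gl, asg, gs, false) = (gl, asg, gs, false) ∧
    ∀ jc ∈ l, jc.1 ∈ asg ∨
      ¬ (0 < PySem.Set.len (PySem.Set.inter (PySem.Set.ofList (pvVarKeys jc.2)) gs)) := by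
  induction l with
  | nil => exact fun gl asg gs _ => ⟨rfl, by simp⟩
  | cons jc l ih =>
    intro gl asg gs hch
    rw [List.foldl_cons] at hch ⊢
    by_cases hmem : jc.1 ∈ asg
    · rw [show pvAstep (gl, asg, gs, false) jc = (gl, asg, gs, false) by
        unfold pvAstep; simp [hmem]] at hch ⊢
      obtain ⟨he, hrest⟩ := ih gl asg gs hch
      exact ⟨he, fun x hx => by
        rcases List.mem_cons.1 hx with rfl | hx
        · exact Or.inl hmem
        · exact hrest x hx⟩
    · by_cases hcond : 0 < PySem.Set.len (PySem.Set.inter (PySem.Set.ofList (pvVarKeys jc.2)) gs)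
      · exfalso
        rw [show pvAstep (gl, asg, gs, false) jc =
            (gl ++ [jc.1], asg ++ [jc.1], PySem.Set.union gs (PySem.Set.ofList (pvVarKeys jc.2)), true) by
          unfold pvAstep; rw [if_neg hmem, if_pos hcond]] at hch
        rw [pvApass_true l _ rfl] at hch
        exact Bool.noConfusion hch
      · rw [show pvAstep (gl, asg, gs, false) jc = (gl, asg, gs, false) by
          unfold pvAstep; rw [if_neg hmem, if_neg hcond]] at hch ⊢
        obtain ⟨he, hrest⟩ := ih gl asg gs hch
        exact ⟨he, fun x hx => by
          rcases List.mem_cons.1 hx with rfl | hx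
          · exact Or.inr hcond
          · exact hrest x hx⟩

theorem pvNodup_length_le {l : List Int} {n : Nat}
    (hnd : l.Nodup) (hb : ∀ x ∈ l, 0 ≤ x ∧ x < (n : Int)) : l.length ≤ n := by
  have h1 : (l.map Int.toNat).Nodup := by
    refine List.Nodup.map_on ?_ hnd
    intro x hx y hy hxy
    have := (hb x hx).1; have := (hb y hy).1; omega
  have h2 : l.map Int.toNat ⊆ List.range n := by
    intro x hx
    simp only [List.mem_map] at hx
    obtain ⟨y, hy, rfl⟩ := hx
    have := hb y hy
    simp only [List.mem_range]; omega
  simpa using (List.subperm_of_subset h1 h2).length_le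

theorem pvEnum_keys (cd : List (List (String × Int))) :
    ∀ jc ∈ PySem.List.enumerate cd, pvVarKeys jc.2 = pvKeysAt (cd.map pvVarKeys) jc.1 := by
  intro jc hjc
  rw [PySem.List.mem_enumerate_iff] at hjc
  obtain ⟨k, hk, rfl⟩ := hjc
  simp only [zero_add]
  unfold pvKeysAt
  rw [if_pos (by positivity)]
  simp only [Int.toNat_natCast]
  rw [List.getD_eq_getElem?_getD, List.getElem?_eq_getElem (by simpa using hk)]
  simp

theorem pvAstep_prefix (st : List Int × List Int × PySem.Set String × Bool)
    (jc : Int × List (String × Int)) : st.1 <+: (pvAstep st jc).1 := by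
  unfold pvAstep
  split
  · exact List.prefix_rfl
  · split
    · exact List.prefix_append _ _
    · exact List.prefix_rfl

theorem pvApass_prefix (l : List (Int × List (String × Int))) :
    ∀ st, st.1 <+: (l.foldl pvAstep st).1 := by
  induction l with
  | nil => exact fun st => List.prefix_rfl
  | cons jc l ih => exact fun st => (pvAstep_prefix st jc).trans (ih _)

theorem pvAwhile_spec (cd : List (List (String × Int))) (i : Int) (asg0 : List Int) :
    ∀ (fuel : Nat) (gl asg : List Int) (gs : PySem.Set String),
    pvAInv (cd.map pvVarKeys) i asg0 (gl, asg, gs, false) →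
    cd.length + 1 ≤ fuel + gl.length →
    pvAInv (cd.map pvVarKeys) i asg0
      ((pvAwhile cd fuel (gl, asg, gs)).1, (pvAwhile cd fuel (gl, asg, gs)).2.1,
       (pvAwhile cd fuel (gl, asg, gs)).2.2, false) ∧
    gl ⊆ (pvAwhile cd fuel (gl, asg, gs)).1 ∧
    (∀ jc ∈ PySem.List.enumerate cd, jc.1 ∈ (pvAwhile cd fuel (gl, asg, gs)).2.1 ∨
      ¬ (0 < PySem.Set.len (PySem.Set.inter (PySem.Set.ofList (pvVarKeys jc.2))
          (pvAwhile cd fuel (gl, asg, gs)).2.2))) := by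
  intro fuel
  induction fuel with
  | zero =>
    intro gl asg gs hInv hfuel
    exfalso
    have hle : gl.length ≤ cd.length := by
      have := pvNodup_length_le hInv.2.1 (by simpa using hInv.2.2.2.2.1)
      simpa using this
    omega
  | succ fuel ih =>
    intro gl asg gs hInv hfuel
    have hpass := pvApass_fold (asg0 := asg0) (i := i) (PySem.List.enumerate cd)
      (pvEnum_keys cd) (gl, asg, gs, false) hInv
    set r1 := pvApass cd (gl, asg, gs, false) with hr1
    have hr1e : (PySem.List.enumerate cd).foldl pvAstep (gl, asg, gs, false) = r1 := rfl
    rw [hr1e] at hpass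
    by_cases hch : r1.2.2.2 = true
    · have hstep : pvAwhile cd (fuel + 1) (gl, asg, gs) = pvAwhile cd fuel (r1.1, r1.2.1, r1.2.2.1) := by
        show (if r1.2.2.2 then pvAwhile cd fuel (r1.1, r1.2.1, r1.2.2.1) else (r1.1, r1.2.1, r1.2.2.1)) = _
        rw [if_pos hch]
      rw [hstep]
      have hgrow : gl.length < r1.1.length := by
        rcases hpass.2.2 hch with h | h
        · exact absurd h (by simp)
        · exact h
      have := ih r1.1 r1.2.1 r1.2.2.1 hpass.1 (by omega)
      exact ⟨this.1, fun x hx => this.2.1 (by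
        exact (pvApass_prefix (PySem.List.enumerate cd) (gl, asg, gs, false)).subset hx), this.2.2⟩
    · have hstep : pvAwhile cd (fuel + 1) (gl, asg, gs) = (r1.1, r1.2.1, r1.2.2.1) := by
        show (if r1.2.2.2 then pvAwhile cd fuel (r1.1, r1.2.1, r1.2.2.1) else (r1.1, r1.2.1, r1.2.2.1)) = _
        rw [if_neg (by simpa using hch)]
      have hnc := pvApass_nochange (PySem.List.enumerate cd) gl asg gs (by
        rw [hr1e]; simpa using hch)
      rw [hr1e] at hnc
      rw [hstep, hnc.1]
      exact ⟨hInv, fun x hx => hx, hnc.2⟩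

theorem pvAgroup (cd : List (List (String × Int))) (k0 : Nat) (hk0 : k0 < cd.length)
    (asg0 : List Int)
    (hcl : ∀ a b, a ∈ asg0 → pvAdjI (cd.map pvVarKeys) a b → b ∈ asg0)
    (hfresh0 : (k0 : Int) ∉ asg0) :
    (∀ x, x ∈ (pvAwhile cd (cd.length + 1)
        ([(k0 : Int)], asg0 ++ [(k0 : Int)],
         PySem.Set.ofList (pvVarKeys (PySem.List.pyGetD cd (k0 : Int) [])))).1 ↔
       pvReach (cd.map pvVarKeys) (k0 : Int) x) ∧
    (pvAwhile cd (cd.length + 1)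
        ([(k0 : Int)], asg0 ++ [(k0 : Int)],
         PySem.Set.ofList (pvVarKeys (PySem.List.pyGetD cd (k0 : Int) [])))).1.Nodup ∧
    (∀ p, p ∈ (pvAwhile cd (cd.length + 1)
        ([(k0 : Int)], asg0 ++ [(k0 : Int)],
         PySem.Set.ofList (pvVarKeys (PySem.List.pyGetD cd (k0 : Int) [])))).2.2 ↔
       ∃ x, pvReach (cd.map pvVarKeys) (k0 : Int) x ∧ p ∈ pvKeysAt (cd.map pvVarKeys) x) ∧
    (pvAwhile cd (cd.length + 1)
        ([(k0 : Int)], asg0 ++ [(k0 : Int)],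
         PySem.Set.ofList (pvVarKeys (PySem.List.pyGetD cd (k0 : Int) [])))).2.2.Nodup ∧
    (∀ x, x ∈ (pvAwhile cd (cd.length + 1)
        ([(k0 : Int)], asg0 ++ [(k0 : Int)],
         PySem.Set.ofList (pvVarKeys (PySem.List.pyGetD cd (k0 : Int) [])))).2.1 ↔
       x ∈ asg0 ∨ pvReach (cd.map pvVarKeys) (k0 : Int) x) := by
  have hkeys0 : pvVarKeys (PySem.List.pyGetD cd (k0 : Int) []) = pvKeysAt (cd.map pvVarKeys) (k0 : Int) := by
    rw [pvKeysAt_map cd pvVarKeys k0 hk0]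
  have hInv0 : pvAInv (cd.map pvVarKeys) (k0 : Int) asg0
      ([(k0 : Int)], asg0 ++ [(k0 : Int)],
       PySem.Set.ofList (pvVarKeys (PySem.List.pyGetD cd (k0 : Int) [])), false) := by
    refine ⟨rfl, List.nodup_singleton _, ?_, ?_, ?_, ?_, PySem.Set.nodup_ofList _⟩
    · intro x hx; rw [List.mem_singleton.1 hx]; exact Relation.ReflTransGen.refl
    · intro x hx; rw [List.mem_singleton.1 hx]; exact hfresh0
    · intro x hx; rw [List.mem_singleton.1 hx]
      constructor
      · positivity
      · simp only [List.length_map]; exact_mod_cast hk0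
    · intro p
      rw [PySem.Set.mem_ofList, hkeys0]
      constructor
      · intro h; exact ⟨(k0 : Int), List.mem_singleton_self _, h⟩
      · rintro ⟨x, hx, h⟩; rwa [← List.mem_singleton.1 hx]
  have hspec := pvAwhile_spec cd (k0 : Int) asg0 (cd.length + 1) _ _ _ hInv0 (by simp)
  set r := pvAwhile cd (cd.length + 1)
    ([(k0 : Int)], asg0 ++ [(k0 : Int)],
     PySem.Set.ofList (pvVarKeys (PySem.List.pyGetD cd (k0 : Int) []))) with hr
  obtain ⟨⟨h1, h2, h3, h4, h5, h6, h7⟩, hsub, hsat⟩ := hspec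
  have hiS : (k0 : Int) ∈ r.1 := hsub (List.mem_singleton_self _)
  -- completeness
  have hcomp : ∀ x, pvReach (cd.map pvVarKeys) (k0 : Int) x → x ∈ r.1 := by
    refine pvReach_mem_closed (V0 := fun x => x ∈ asg0) hcl h4 hiS ?_
    intro x hx b hadj
    obtain ⟨p, hp1, hp2⟩ := hadj
    have hbb := pvMem_keysAt_bounds hp2
    have hbmem : ((b.toNat : Nat) : Int) ∈ r.2.1 ∨
        ¬ (0 < PySem.Set.len (PySem.Set.inter
            (PySem.Set.ofList (pvVarKeys (cd[b.toNat]'(by simpa using hbb.2)))) r.2.2)) := by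
      have : ((0 : Int) + (b.toNat : Int), cd[b.toNat]'(by simpa using hbb.2)) ∈
          PySem.List.enumerate cd := by
        rw [PySem.List.mem_enumerate_iff]
        exact ⟨b.toNat, by simpa using hbb.2, rfl⟩
      simpa using hsat _ this
    rw [Int.toNat_of_nonneg hbb.1] at hbmem
    rcases hbmem with hmem | hnint
    · rw [h1] at hmem
      rcases List.mem_append.1 hmem with h | h
      · exact Or.inl h
      · exact Or.inr h
    · exfalso
      apply hnint
      rw [pvInter_pos]
      refine ⟨p, ?_, ?_⟩
      · rw [PySem.Set.mem_ofList]
        have : pvVarKeys (cd[b.toNat]'(by simpa using hbb.2)) = pvKeysAt (cd.map pvVarKeys) b := by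
          have := pvKeysAt_map cd pvVarKeys b.toNat (by simpa using hbb.2)
          rw [Int.toNat_of_nonneg hbb.1] at this
          rw [this]
          congr 1
          conv_rhs => rw [← Int.toNat_of_nonneg hbb.1]
          rw [PySem.List.pyGetD_natCast]
          rw [List.getD_eq_getElem?_getD,
            List.getElem?_eq_getElem (show b.toNat < cd.length by simpa using hbb.2)]
          simp
        rw [this]; exact hp2
      · rw [h6]; exact ⟨x, hx, hp1⟩
  have hmem1 : ∀ x, x ∈ r.1 ↔ pvReach (cd.map pvVarKeys) (k0 : Int) x :=
    fun x => ⟨fun h => h3 x h, fun h => hcomp x h⟩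
  refine ⟨hmem1, h2, ?_, h7, ?_⟩
  · intro p
    rw [h6]
    constructor
    · rintro ⟨x, hx, hp⟩; exact ⟨x, (hmem1 x).1 hx, hp⟩
    · rintro ⟨x, hx, hp⟩; exact ⟨x, (hmem1 x).2 hx, hp⟩
  · intro x
    rw [h1]
    rw [List.mem_append]
    constructor
    · rintro (h | h)
      · exact Or.inl h
      · exact Or.inr ((hmem1 x).1 h)
    · rintro (h | h)
      · exact Or.inl h
      · exact Or.inr ((hmem1 x).2 h)

theorem pvBindex_inner (c : List String) (s : Int) (d : PySem.Dict String (List Int))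
    (p : String) (x : Int) :
    x ∈ (c.foldl (fun d q => d.insert q (d.getD q [] ++ [s])) d).getD p [] ↔
      x ∈ d.getD p [] ∨ (p ∈ c ∧ x = s) := by
  induction c generalizing d with
  | nil => simp
  | cons q c ih =>
    simp only [List.foldl_cons, ih, PySem.Dict.getD_insert, List.mem_cons]
    by_cases hpq : p = q
    · subst hpq; simp
      intro _ h; exact Or.inr h
    · simp [hpq]

theorem pvBindex_aux (kl : List (List String)) (s : Int) (d : PySem.Dict String (List Int))
    (p : String) (x : Int) :
    x ∈ ((PySem.List.enumerate kl s).foldl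
        (fun d ik => ik.2.foldl (fun d p => d.insert p (d.getD p [] ++ [ik.1])) d) d).getD p [] ↔
      x ∈ d.getD p [] ∨ ∃ k : Nat, k < kl.length ∧ x = s + k ∧ p ∈ kl.getD k [] := by
  induction kl generalizing s d with
  | nil => simp [PySem.List.enumerate_nil]
  | cons c kl ih =>
    rw [PySem.List.enumerate_cons, List.foldl_cons]
    rw [ih, pvBindex_inner]
    constructor
    · rintro ((h | ⟨hc, rfl⟩) | ⟨k, hk, rfl, hmem⟩)
      · exact Or.inl h
      · exact Or.inr ⟨0, by simp, by simp, by simpa using hc⟩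
      · exact Or.inr ⟨k + 1, by simpa using hk, by push_cast; ring, by simpa using hmem⟩
    · rintro (h | ⟨k, hk, rfl, hmem⟩)
      · exact Or.inl (Or.inl h)
      · match k with
        | 0 => exact Or.inl (Or.inr ⟨by simpa using hmem, by simp⟩)
        | k + 1 =>
          refine Or.inr ⟨k, by simpa using hk, by push_cast; ring, by simpa using hmem⟩

theorem pvBindex_mem (kl : List (List String)) (p : String) (x : Int) :
    x ∈ (pvBindex kl).getD p [] ↔
      ∃ k : Nat, k < kl.length ∧ x = (k : Int) ∧ p ∈ kl.getD k [] := by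
  unfold pvBindex
  rw [show (PySem.List.enumerate kl : List (Int × List String)) = PySem.List.enumerate kl 0 from rfl,
    pvBindex_aux]
  simp [PySem.Dict.getD_empty]

theorem pvBpush_fold (ks : List Int) : ∀ (stk : List Int) (vis : PySem.Set Int),
    ∃ Δ, (ks.foldl pvBpush (stk, vis)).1 = stk ++ Δ ∧
      (∀ x, x ∈ (ks.foldl pvBpush (stk, vis)).2 ↔ x ∈ vis ∨ x ∈ Δ) ∧
      (∀ x ∈ Δ, x ∈ ks ∧ x ∉ vis) ∧ Δ.Nodup ∧
      (∀ k ∈ ks, k ∈ (ks.foldl pvBpush (stk, vis)).2) ∧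
      (vis.Nodup → (ks.foldl pvBpush (stk, vis)).2.Nodup) := by
  induction ks with
  | nil => exact fun stk vis => ⟨[], by simp⟩
  | cons k ks ih =>
    intro stk vis
    rw [List.foldl_cons]
    by_cases hc : PySem.Set.contains vis k
    · rw [show pvBpush (stk, vis) k = (stk, vis) by unfold pvBpush; rw [if_pos hc]]
      obtain ⟨Δ, e1, e2, e3, e4, e5, e6⟩ := ih stk vis
      refine ⟨Δ, e1, e2, fun x hx => ⟨List.mem_cons_of_mem _ (e3 x hx).1, (e3 x hx).2⟩, e4, ?_, e6⟩
      intro k' hk'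
      rcases List.mem_cons.1 hk' with rfl | hk'
      · exact (e2 k').2 (Or.inl ((PySem.Set.contains_iff vis k').1 hc))
      · exact e5 k' hk'
    · rw [show pvBpush (stk, vis) k = (stk ++ [k], PySem.Set.add vis k) by
        unfold pvBpush; rw [if_neg hc]]
      obtain ⟨Δ, e1, e2, e3, e4, e5, e6⟩ := ih (stk ++ [k]) (PySem.Set.add vis k)
      have hknv : k ∉ vis := fun h => hc ((PySem.Set.contains_iff vis k).2 h)
      refine ⟨k :: Δ, by rw [e1, List.append_assoc]; rfl, ?_, ?_, ?_, ?_, ?_⟩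
      · intro x
        rw [e2, PySem.Set.mem_add]
        constructor
        · rintro ((h | h) | h)
          · exact Or.inl h
          · exact Or.inr (by rw [h]; exact List.mem_cons_self)
          · exact Or.inr (List.mem_cons_of_mem _ h)
        · rintro (h | h)
          · exact Or.inl (Or.inl h)
          · rcases List.mem_cons.1 h with rfl | h
            · exact Or.inl (Or.inr rfl)
            · exact Or.inr h
      · intro x hx
        rcases List.mem_cons.1 hx with rfl | hx
        · exact ⟨List.mem_cons_self, hknv⟩
        · obtain ⟨hks, hnv⟩ := e3 x hx
          refine ⟨List.mem_cons_of_mem _ hks, fun hv => hnv ((PySem.Set.mem_add vis k x).2 (Or.inl hv))⟩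
      · refine List.nodup_cons.2 ⟨?_, e4⟩
        intro hk
        exact (e3 k hk).2 ((PySem.Set.mem_add vis k k).2 (Or.inr rfl))
      · intro k' hk'
        rcases List.mem_cons.1 hk' with rfl | hk'
        · exact (e2 k').2 (Or.inl ((PySem.Set.mem_add vis k' k').2 (Or.inr rfl)))
        · exact e5 k' hk'
      · intro hvn
        exact e6 (PySem.Set.nodup_add vis k hvn)

theorem pvBkey_fold (index : PySem.Dict String (List Int)) (ps : List String) :
    ∀ (stk : List Int) (vis : PySem.Set Int) (par : PySem.Set String),
    ∃ Δ, (ps.foldl (pvBkey index) (stk, vis, par)).1 = stk ++ Δ ∧ Δ.Nodup ∧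
      (∀ x ∈ Δ, x ∉ vis ∧ ∃ p ∈ ps, x ∈ index.getD p []) ∧
      (∀ x, x ∈ (ps.foldl (pvBkey index) (stk, vis, par)).2.1 ↔ x ∈ vis ∨ x ∈ Δ) ∧
      (∀ q, q ∈ (ps.foldl (pvBkey index) (stk, vis, par)).2.2 ↔ q ∈ par ∨ q ∈ ps) ∧
      (∀ p ∈ ps, ∀ k ∈ index.getD p [], k ∈ (ps.foldl (pvBkey index) (stk, vis, par)).2.1) ∧
      (vis.Nodup → (ps.foldl (pvBkey index) (stk, vis, par)).2.1.Nodup) ∧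
      (par.Nodup → (ps.foldl (pvBkey index) (stk, vis, par)).2.2.Nodup) := by
  induction ps with
  | nil => exact fun stk vis par => ⟨[], by simp⟩
  | cons p ps ih =>
    intro stk vis par
    rw [List.foldl_cons]
    obtain ⟨Δ1, f1, f2, f3, f4, f5, f6⟩ := pvBpush_fold (index.getD p []) stk vis
    have hstep : pvBkey index (stk, vis, par) p =
        (((index.getD p []).foldl pvBpush (stk, vis)).1,
         ((index.getD p []).foldl pvBpush (stk, vis)).2, PySem.Set.add par p) := by
      unfold pvBkey; rfl
    rw [hstep, f1]
    set vis1 := ((index.getD p []).foldl pvBpush (stk, vis)).2 with hvis1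
    obtain ⟨Δ2, g1, g2, g3, g4, g5, g6, g7, g8⟩ := ih (stk ++ Δ1) vis1 (PySem.Set.add par p)
    refine ⟨Δ1 ++ Δ2, by rw [g1, List.append_assoc], ?_, ?_, ?_, ?_, ?_, ?_, ?_⟩
    · refine List.Nodup.append f4 g2 ?_
      intro a ha hb
      exact (g3 a hb).1 (f2 a |>.2 (Or.inr ha))
    · intro x hx
      rcases List.mem_append.1 hx with hx | hx
      · exact ⟨(f3 x hx).2, ⟨p, List.mem_cons_self, (f3 x hx).1⟩⟩
      · obtain ⟨hnv1, q, hq, hiq⟩ := g3 x hx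
        exact ⟨fun hv => hnv1 ((f2 x).2 (Or.inl hv)), ⟨q, List.mem_cons_of_mem _ hq, hiq⟩⟩
    · intro x
      rw [g4, f2, List.mem_append]
      tauto
    · intro q
      rw [g5, PySem.Set.mem_add, List.mem_cons]
      tauto
    · intro q hq k hk
      rcases List.mem_cons.1 hq with rfl | hq
      · exact (g4 k).2 (Or.inl (f5 k hk))
      · exact g6 q hq k hk
    · intro hvn
      exact g7 (f6 hvn)
    · intro hpn
      exact g8 (PySem.Set.nodup_add par p hpn)

def pvBpost (kl : List (List String)) (i : Int) (vis0 : PySem.Set Int) (start : List Int)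
    (r : List Int × PySem.Set Int × PySem.Set String) : Prop :=
  r.1.Nodup ∧
  (∀ x ∈ r.1, (0 ≤ x ∧ x.toNat < kl.length) ∧ pvReach kl i x ∧ x ∉ vis0) ∧
  (∀ x ∈ start, x ∈ r.1) ∧
  (∀ x ∈ r.1, ∀ b, pvAdjI kl x b → b ∈ r.2.1) ∧
  (∀ x, x ∈ r.2.1 ↔ x ∈ vis0 ∨ x ∈ r.1) ∧
  (∀ p, p ∈ r.2.2 ↔ ∃ x ∈ r.1, p ∈ pvKeysAt kl x) ∧
  r.2.1.Nodup ∧ r.2.2.Nodup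

theorem pvKeysAt_pyGetD (kl : List (List String)) (j : Int) (hj : 0 ≤ j) :
    PySem.List.pyGetD kl j [] = pvKeysAt kl j := by
  unfold pvKeysAt
  rw [if_pos hj]
  conv_lhs => rw [← Int.toNat_of_nonneg hj]
  rw [PySem.List.pyGetD_natCast]

theorem pvPerm_regroup (a b d : List Int) (j : Int) :
    ((a ++ (b ++ [j])) ++ d).Perm ((a ++ [j]) ++ (b ++ d)) := by
  refine Multiset.coe_eq_coe.1 ?_
  rw [← Multiset.coe_add, ← Multiset.coe_add, ← Multiset.coe_add, ← Multiset.coe_add,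
    ← Multiset.coe_add, ← Multiset.coe_add]
  abel

theorem pvBdfs_spec (kl : List (List String)) (i : Int) (vis0 : PySem.Set Int) :
    ∀ (fuel : Nat) (comp stack : List Int) (vis : PySem.Set Int) (par : PySem.Set String),
    (∀ x, x ∈ vis ↔ x ∈ vis0 ∨ x ∈ comp ∨ x ∈ stack) →
    ((comp ++ stack).Nodup) →
    (∀ x ∈ comp ++ stack, (0 ≤ x ∧ x.toNat < kl.length) ∧ pvReach kl i x ∧ x ∉ vis0) →
    (∀ p, p ∈ par ↔ ∃ x ∈ comp, p ∈ pvKeysAt kl x) →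
    (∀ x ∈ comp, ∀ b, pvAdjI kl x b → b ∈ vis) →
    (vis.Nodup) → (par.Nodup) →
    (kl.length + 1 ≤ fuel + comp.length) →
    pvBpost kl i vis0 (comp ++ stack) (pvBdfs kl (pvBindex kl) fuel (comp, stack, vis, par)) := by
  intro fuel
  induction fuel with
  | zero =>
    intro comp stack vis par h1 h2 h3 h4 h5 hvn hpn hfuel
    exfalso
    have : comp.length ≤ kl.length := by
      refine pvNodup_length_le (h2.sublist (List.sublist_append_left _ _)) ?_
      intro x hx
      have := (h3 x (List.mem_append_left _ hx)).1
      omega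
    omega
  | succ fuel ih =>
    intro comp stack vis par h1 h2 h3 h4 h5 hvn hpn hfuel
    rcases List.eq_nil_or_concat' stack with hstk | ⟨rest, j, hstk⟩
    · subst hstk
      have he : pvBdfs kl (pvBindex kl) (fuel + 1) (comp, [], vis, par) = (comp, vis, par) := rfl
      rw [he]
      refine ⟨by simpa using h2, by simpa using h3, by simp, h5, ?_, h4, hvn, hpn⟩
      intro x
      rw [h1]; simp
    · subst hstk
      -- pop the last element j
      have hpop : PySem.List.pop? (rest ++ [j]) (-1) = some (j, rest) :=
        PySem.List.pop?_last rest j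
      have hjmem : j ∈ comp ++ (rest ++ [j]) := by simp
      have hjprops := h3 j hjmem
      have hks : PySem.List.pyGetD kl j [] = pvKeysAt kl j := pvKeysAt_pyGetD kl j hjprops.1.1
      obtain ⟨Δ, f1, f2, f3, f4, f5, f6, f7, f8⟩ :=
        pvBkey_fold (pvBindex kl) (PySem.List.pyGetD kl j []) rest vis par
      set rr := (PySem.List.pyGetD kl j []).foldl (pvBkey (pvBindex kl)) (rest, vis, par) with hrr
      have hstep : pvBdfs kl (pvBindex kl) (fuel + 1) (comp, rest ++ [j], vis, par) =
          pvBdfs kl (pvBindex kl) fuel (comp ++ [j], rr.1, rr.2.1, rr.2.2) := by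
        simp only [pvBdfs, hpop, hrr]
      rw [hstep]
      -- keys of kl at a natCast index
      have hKSnat : ∀ k : Nat, k < kl.length → kl.getD k [] = pvKeysAt kl (k : Int) := by
        intro k hk
        unfold pvKeysAt
        rw [if_pos (by positivity)]
        simp
      have hmemvis : ∀ x, (x ∈ comp ∨ x ∈ rest ∨ x = j) → x ∈ vis := by
        intro x hx
        rw [h1]
        rcases hx with hx | hx | rfl
        · exact Or.inr (Or.inl hx)
        · exact Or.inr (Or.inr (List.mem_append_left _ hx))
        · exact Or.inr (Or.inr (List.mem_append_right _ (List.mem_singleton_self _)))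
      have hΔprops : ∀ x ∈ Δ, (0 ≤ x ∧ x.toNat < kl.length) ∧ pvReach kl i x ∧ x ∉ vis0 ∧ x ∉ vis := by
        intro x hx
        obtain ⟨hnv, p, hp, hix⟩ := f3 x hx
        rw [hks] at hp
        obtain ⟨k, hk, rfl, hpk⟩ := (pvBindex_mem kl p x).1 hix
        rw [hKSnat k hk] at hpk
        have hreach : pvReach kl i (k : Int) :=
          Relation.ReflTransGen.tail hjprops.2.1 ⟨p, hp, hpk⟩
        exact ⟨⟨by positivity, by simpa using hk⟩, hreach,
          fun h0 => hnv (by rw [h1]; exact Or.inl h0), hnv⟩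
      have h1' : ∀ x, x ∈ rr.2.1 ↔ x ∈ vis0 ∨ x ∈ comp ++ [j] ∨ x ∈ rest ++ Δ := by
        intro x
        rw [f4, h1]
        simp only [List.mem_append, List.mem_singleton]
        tauto
      have h2' : ((comp ++ [j]) ++ (rest ++ Δ)).Nodup := by
        have hdisj : (comp ++ (rest ++ [j])).Disjoint Δ := by
          intro a ha haΔ
          exact (hΔprops a haΔ).2.2.2 (hmemvis a (by
            simp only [List.mem_append, List.mem_singleton] at ha; tauto))
        exact (pvPerm_regroup comp rest Δ j).nodup (h2.append f2 hdisj)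
      have h3' : ∀ x ∈ (comp ++ [j]) ++ (rest ++ Δ),
          (0 ≤ x ∧ x.toNat < kl.length) ∧ pvReach kl i x ∧ x ∉ vis0 := by
        intro x hx
        simp only [List.mem_append, List.mem_singleton] at hx
        rcases hx with (hx | rfl) | hx | hx
        · exact h3 x (List.mem_append_left _ hx)
        · exact hjprops
        · exact h3 x (List.mem_append_right _ (List.mem_append_left _ hx))
        · exact ⟨(hΔprops x hx).1, (hΔprops x hx).2.1, (hΔprops x hx).2.2.1⟩
      have h4' : ∀ p, p ∈ rr.2.2 ↔ ∃ x ∈ comp ++ [j], p ∈ pvKeysAt kl x := by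
        intro p
        rw [f5, h4, hks]
        constructor
        · rintro (⟨x, hx, hp⟩ | hp)
          · exact ⟨x, List.mem_append_left _ hx, hp⟩
          · exact ⟨j, List.mem_append_right _ (List.mem_singleton_self _), hp⟩
        · rintro ⟨x, hx, hp⟩
          rcases List.mem_append.1 hx with hx | hx
          · exact Or.inl ⟨x, hx, hp⟩
          · exact Or.inr (by rw [List.mem_singleton.1 hx] at hp; exact hp)
      have h5' : ∀ x ∈ comp ++ [j], ∀ b, pvAdjI kl x b → b ∈ rr.2.1 := by
        intro x hx b hadj
        rcases List.mem_append.1 hx with hx | hx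
        · exact (f4 b).2 (Or.inl (h5 x hx b hadj))
        · rw [List.mem_singleton.1 hx] at hadj
          obtain ⟨p, hp1, hp2⟩ := hadj
          have hbb := pvMem_keysAt_bounds hp2
          have hbidx : b ∈ (pvBindex kl).getD p [] := by
            rw [pvBindex_mem]
            refine ⟨b.toNat, hbb.2, (Int.toNat_of_nonneg hbb.1).symm, ?_⟩
            rw [hKSnat b.toNat hbb.2, Int.toNat_of_nonneg hbb.1]
            exact hp2
          exact f6 p (by rw [hks]; exact hp1) b hbidx
      have hpost := ih (comp ++ [j]) (rest ++ Δ) rr.2.1 rr.2.2 h1' h2' h3' h4' h5'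
        (f7 hvn) (f8 hpn) (by simp only [List.length_append, List.length_singleton]; omega)
      rw [← f1] at hpost
      obtain ⟨g1, g2, g3, g4, g5, g6, g7, g8⟩ := hpost
      refine ⟨g1, g2, ?_, g4, g5, g6, g7, g8⟩
      intro x hx
      simp only [List.mem_append, List.mem_singleton] at hx
      apply g3
      rw [f1]
      simp only [List.mem_append, List.mem_singleton]
      tauto

theorem pvStep_eq (cd : List (List (String × Int))) (k0 : Nat) (hk0 : k0 < cd.length)
    (asg0 : List Int) (vis0 : PySem.Set Int)
    (hmm : ∀ x, x ∈ asg0 ↔ x ∈ vis0)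
    (hcl : ∀ a b, a ∈ asg0 → pvAdjI (cd.map pvVarKeys) a b → b ∈ asg0)
    (hvn : vis0.Nodup)
    (hni : (k0 : Int) ∉ asg0) :
    PySem.List.sorted (pvAwhile cd (cd.length + 1)
        ([(k0 : Int)], asg0 ++ [(k0 : Int)],
         PySem.Set.ofList (pvVarKeys (PySem.List.pyGetD cd (k0 : Int) [])))).1 (fun x => x) false =
      PySem.List.sorted (pvBdfs (cd.map pvVarKeys) (pvBindex (cd.map pvVarKeys)) (cd.length + 1)
        ([], [(k0 : Int)], PySem.Set.add vis0 (k0 : Int), PySem.Set.empty)).1 (fun x => x) false ∧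
    PySem.List.sorted (pvAwhile cd (cd.length + 1)
        ([(k0 : Int)], asg0 ++ [(k0 : Int)],
         PySem.Set.ofList (pvVarKeys (PySem.List.pyGetD cd (k0 : Int) [])))).2.2 (fun x => x) false =
      PySem.List.sorted (pvBdfs (cd.map pvVarKeys) (pvBindex (cd.map pvVarKeys)) (cd.length + 1)
        ([], [(k0 : Int)], PySem.Set.add vis0 (k0 : Int), PySem.Set.empty)).2.2 (fun x => x) false ∧
    (∀ x, x ∈ (pvAwhile cd (cd.length + 1)
        ([(k0 : Int)], asg0 ++ [(k0 : Int)],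
         PySem.Set.ofList (pvVarKeys (PySem.List.pyGetD cd (k0 : Int) [])))).2.1 ↔
      x ∈ (pvBdfs (cd.map pvVarKeys) (pvBindex (cd.map pvVarKeys)) (cd.length + 1)
        ([], [(k0 : Int)], PySem.Set.add vis0 (k0 : Int), PySem.Set.empty)).2.1) ∧
    (∀ a b, a ∈ (pvAwhile cd (cd.length + 1)
        ([(k0 : Int)], asg0 ++ [(k0 : Int)],
         PySem.Set.ofList (pvVarKeys (PySem.List.pyGetD cd (k0 : Int) [])))).2.1 →
      pvAdjI (cd.map pvVarKeys) a b →
      b ∈ (pvAwhile cd (cd.length + 1)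
        ([(k0 : Int)], asg0 ++ [(k0 : Int)],
         PySem.Set.ofList (pvVarKeys (PySem.List.pyGetD cd (k0 : Int) [])))).2.1) ∧
    (pvBdfs (cd.map pvVarKeys) (pvBindex (cd.map pvVarKeys)) (cd.length + 1)
        ([], [(k0 : Int)], PySem.Set.add vis0 (k0 : Int), PySem.Set.empty)).2.1.Nodup := by
  set kl := cd.map pvVarKeys with hkl
  have hnivis : (k0 : Int) ∉ vis0 := fun h => hni ((hmm _).2 h)
  have hA := pvAgroup cd k0 hk0 asg0 hcl hni
  set rA := pvAwhile cd (cd.length + 1)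
    ([(k0 : Int)], asg0 ++ [(k0 : Int)],
     PySem.Set.ofList (pvVarKeys (PySem.List.pyGetD cd (k0 : Int) []))) with hrA
  obtain ⟨a1, a2, a3, a4, a5⟩ := hA
  have hB := pvBdfs_spec kl (k0 : Int) vis0 (cd.length + 1) [] [(k0 : Int)]
    (PySem.Set.add vis0 (k0 : Int)) PySem.Set.empty
    (by
      intro x
      rw [PySem.Set.mem_add]
      simp only [List.mem_singleton, List.not_mem_nil, false_or]
      )
    (by simp)
    (by
      intro x hx
      rw [List.nil_append, List.mem_singleton] at hx
      subst hx
      refine ⟨⟨by positivity, by simp [hkl]; omega⟩, Relation.ReflTransGen.refl, hnivis⟩)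
    (by simp [PySem.Set.empty])
    (by simp)
    (PySem.Set.nodup_add vis0 _ hvn)
    (by simp [PySem.Set.empty])
    (by simp [hkl])
  set rB := pvBdfs kl (pvBindex kl) (cd.length + 1)
    ([], [(k0 : Int)], PySem.Set.add vis0 (k0 : Int), PySem.Set.empty) with hrB
  obtain ⟨b1, b2, b3, b4, b5, b6, b7, b8⟩ := hB
  have hiB : (k0 : Int) ∈ rB.1 := b3 _ (by simp)
  -- completeness for B
  have hBcomp : ∀ x, pvReach kl (k0 : Int) x → x ∈ rB.1 := by
    refine pvReach_mem_closed (V0 := fun x => x ∈ vis0) ?_ ?_ hiB ?_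
    · intro a b ha hadj
      exact (hmm b).1 (hcl a b ((hmm a).2 ha) hadj)
    · exact fun x hx => (b2 x hx).2.2
    · intro x hx b hadj
      have := b4 x hx b hadj
      rw [b5] at this
      exact this
  have hBmem : ∀ x, x ∈ rB.1 ↔ pvReach kl (k0 : Int) x :=
    fun x => ⟨fun h => (b2 x h).2.1, hBcomp x⟩
  have hperm1 : rA.1.Perm rB.1 := by
    rw [List.perm_ext_iff_of_nodup a2 b1]
    intro x
    rw [a1, hBmem]
  have hperm2 : rA.2.2.Perm rB.2.2 := by
    refine (List.perm_ext_iff_of_nodup a4 b8).2 ?_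
    intro p
    rw [a3, b6]
    constructor
    · rintro ⟨x, hr, hp⟩; exact ⟨x, (hBmem x).2 hr, hp⟩
    · rintro ⟨x, hx, hp⟩; exact ⟨x, (hBmem x).1 hx, hp⟩
  refine ⟨PySem.List.sorted_eq_sorted_of_perm _ _ _ (fun a b h => h) hperm1,
    PySem.List.sorted_eq_sorted_of_perm _ _ _ (fun a b h => h) hperm2, ?_, ?_, b7⟩
  · intro x
    rw [a5, b5, hBmem]
    constructor
    · rintro (h | h)
      · exact Or.inl ((hmm x).1 h)
      · exact Or.inr h
    · rintro (h | h)
      · exact Or.inl ((hmm x).2 h)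
      · exact Or.inr h
  · intro a b ha hadj
    rw [a5] at ha ⊢
    rcases ha with ha | ha
    · exact Or.inl (hcl a b ha hadj)
    · exact Or.inr (Relation.ReflTransGen.tail ha hadj)

theorem pvOuter_sync (cd : List (List (String × Int))) (l : List Int)
    (hl : ∀ j ∈ l, ∃ k : Nat, k < cd.length ∧ j = (k : Int)) :
    ∀ (asg : List Int) (vis : PySem.Set Int) (g : List (List Int)) (pr : List (List String)),
    (∀ x, x ∈ asg ↔ x ∈ vis) →
    (∀ a b, a ∈ asg → pvAdjI (cd.map pvVarKeys) a b → b ∈ asg) →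
    vis.Nodup →
    (l.foldl (fun st j => pvAouter cd st (j, PySem.List.pyGetD cd j [])) (asg, g, pr)).2 =
    (l.foldl (pvBouter (cd.map pvVarKeys) (pvBindex (cd.map pvVarKeys)) cd.length)
      (vis, g, pr)).2 := by
  induction l with
  | nil => intro asg vis g pr _ _ _; rfl
  | cons j l ih =>
    intro asg vis g pr hmm hcl hvn
    obtain ⟨k, hk, rfl⟩ := hl j List.mem_cons_self
    have hl' : ∀ j ∈ l, ∃ k : Nat, k < cd.length ∧ j = (k : Int) :=
      fun x hx => hl x (List.mem_cons_of_mem _ hx)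
    rw [List.foldl_cons, List.foldl_cons]
    by_cases hmem : (k : Int) ∈ asg
    · have hA : pvAouter cd (asg, g, pr) ((k : Int), PySem.List.pyGetD cd (k : Int) []) = (asg, g, pr) := by
        unfold pvAouter; rw [if_pos hmem]
      have hB : pvBouter (cd.map pvVarKeys) (pvBindex (cd.map pvVarKeys)) cd.length
          (vis, g, pr) (k : Int) = (vis, g, pr) := by
        unfold pvBouter
        rw [if_pos ((PySem.Set.contains_iff vis _).2 ((hmm _).1 hmem))]
      rw [hA, hB]
      exact ih hl' asg vis g pr hmm hcl hvn
    · have hnvis : ¬ PySem.Set.contains vis (k : Int) = true := by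
        intro h
        exact hmem ((hmm _).2 ((PySem.Set.contains_iff vis _).1 h))
      obtain ⟨e1, e2, e3, e4, e5⟩ := pvStep_eq cd k hk asg vis hmm hcl hvn hmem
      have hA : pvAouter cd (asg, g, pr) ((k : Int), PySem.List.pyGetD cd (k : Int) []) =
          ((pvAwhile cd (cd.length + 1)
            ([(k : Int)], asg ++ [(k : Int)],
             PySem.Set.ofList (pvVarKeys (PySem.List.pyGetD cd (k : Int) [])))).2.1,
           g ++ [PySem.List.sorted (pvAwhile cd (cd.length + 1)
            ([(k : Int)], asg ++ [(k : Int)],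
             PySem.Set.ofList (pvVarKeys (PySem.List.pyGetD cd (k : Int) [])))).1 (fun x => x) false],
           pr ++ [PySem.List.sorted (pvAwhile cd (cd.length + 1)
            ([(k : Int)], asg ++ [(k : Int)],
             PySem.Set.ofList (pvVarKeys (PySem.List.pyGetD cd (k : Int) [])))).2.2 (fun x => x) false]) := by
        unfold pvAouter; rw [if_neg hmem]
      have hB : pvBouter (cd.map pvVarKeys) (pvBindex (cd.map pvVarKeys)) cd.length
          (vis, g, pr) (k : Int) =
          ((pvBdfs (cd.map pvVarKeys) (pvBindex (cd.map pvVarKeys)) (cd.length + 1)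
            ([], [(k : Int)], PySem.Set.add vis (k : Int), PySem.Set.empty)).2.1,
           g ++ [PySem.List.sorted (pvBdfs (cd.map pvVarKeys) (pvBindex (cd.map pvVarKeys)) (cd.length + 1)
            ([], [(k : Int)], PySem.Set.add vis (k : Int), PySem.Set.empty)).1 (fun x => x) false],
           pr ++ [PySem.List.sorted (pvBdfs (cd.map pvVarKeys) (pvBindex (cd.map pvVarKeys)) (cd.length + 1)
            ([], [(k : Int)], PySem.Set.add vis (k : Int), PySem.Set.empty)).2.2 (fun x => x) false]) := by
        unfold pvBouter; rw [if_neg hnvis]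
      rw [hA, hB, e1, e2]
      exact ih hl' _ _ _ _ e3 e4 e5

theorem pvGroupConstraints_eq (cd : List (List (String × Int))) :
    GroupConstraints cd = GroupConstraints_alt cd := by
  unfold GroupConstraints GroupConstraints_alt
  have henum : PySem.List.enumerate cd =
      (PySem.List.pyRange 0 (cd.length : Int) 1).map
        (fun j => (j, PySem.List.pyGetD cd j [])) := by
    rw [PySem.List.enumerate_eq_map_pyRange cd []]
    norm_num [PySem.List.len_eq]
  rw [henum, List.foldl_map]
  have := pvOuter_sync cd (PySem.List.pyRange 0 (cd.length : Int) 1)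
    (by
      intro j hj
      rw [PySem.List.mem_pyRange_one] at hj
      exact ⟨j.toNat, by omega, (Int.toNat_of_nonneg hj.1).symm⟩)
    [] PySem.Set.empty [] []
    (by simp [PySem.Set.empty])
    (by simp)
    (by simp [PySem.Set.empty])
  show ((List.foldl (fun st j => pvAouter cd st (j, PySem.List.pyGetD cd j [])) ([], [], [])
      (PySem.List.pyRange 0 (cd.length : Int) 1)).2.1,
     (List.foldl (fun st j => pvAouter cd st (j, PySem.List.pyGetD cd j [])) ([], [], [])
      (PySem.List.pyRange 0 (cd.length : Int) 1)).2.2) =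
    ((List.foldl (pvBouter (cd.map pvVarKeys) (pvBindex (cd.map pvVarKeys)) cd.length)
      (PySem.Set.empty, [], []) (PySem.List.pyRange 0 (cd.length : Int) 1)).2.1,
     (List.foldl (pvBouter (cd.map pvVarKeys) (pvBindex (cd.map pvVarKeys)) cd.length)
      (PySem.Set.empty, [], []) (PySem.List.pyRange 0 (cd.length : Int) 1)).2.2)
  show ((List.foldl (fun st j => pvAouter cd st (j, PySem.List.pyGetD cd j [])) ([], [], [])
      (PySem.List.pyRange 0 (cd.length : Int) 1)).2.1,
     (List.foldl (fun st j => pvAouter cd st (j, PySem.List.pyGetD cd j [])) ([], [], [])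
      (PySem.List.pyRange 0 (cd.length : Int) 1)).2.2) =
    ((List.foldl (pvBouter (cd.map pvVarKeys) (pvBindex (cd.map pvVarKeys)) cd.length)
      (PySem.Set.empty, [], []) (PySem.List.pyRange 0 (cd.length : Int) 1)).2.1,
     (List.foldl (pvBouter (cd.map pvVarKeys) (pvBindex (cd.map pvVarKeys)) cd.length)
      (PySem.Set.empty, [], []) (PySem.List.pyRange 0 (cd.length : Int) 1)).2.2)
  show ((List.foldl (fun st j => pvAouter cd st (j, PySem.List.pyGetD cd j [])) ([], [], [])
      (PySem.List.pyRange 0 (cd.length : Int) 1)).2.1,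
     (List.foldl (fun st j => pvAouter cd st (j, PySem.List.pyGetD cd j [])) ([], [], [])
      (PySem.List.pyRange 0 (cd.length : Int) 1)).2.2) =
    ((List.foldl (pvBouter (cd.map pvVarKeys) (pvBindex (cd.map pvVarKeys)) cd.length)
      (PySem.Set.empty, [], []) (PySem.List.pyRange 0 (cd.length : Int) 1)).2.1,
     (List.foldl (pvBouter (cd.map pvVarKeys) (pvBindex (cd.map pvVarKeys)) cd.length)
      (PySem.Set.empty, [], []) (PySem.List.pyRange 0 (cd.length : Int) 1)).2.2)
  rw [this]

-- ===== VERDICT =====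
theorem GroupConstraints_spec : Claim_equal_GroupConstraints := by
  intro constrDict _
  unfold Spec_GroupConstraints
  exact pvGroupConstraints_eq constrDict
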